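-- pv_equiv track=rewrite | github.com/BretjHribar/AutomatedFactorResearcher | factor-alpha-platform/prod/stats/ops_dashboard.py | _market_status
-- ===== SOURCE A (Python) =====
-- from typing import Any
--
-- def _market_status(checks: list[dict[str, Any]], market: str) -> str:
--     market_checks = [c for c in checks if c.get("market") == market]
--     if not market_checks:
--         return "unknown"
--     statuses = {str(c.get("status", "")).lower() for c in market_checks}
--     if "fail" in statuses:
--         return "blocked"
--     if "warn" in statuses:
--         return "warning"
--     return "ready"
-- ===== SOURCE B (Python) =====
-- def _severity(c, market):
--     if c.get("market") != market:
--         return 0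
--     s = str(c.get("status", "")).lower()
--     return 3 if s == "fail" else 2 if s == "warn" else 1
--
-- def _market_status(checks, market):
--     rank = max((_severity(c, market) for c in checks), default=0)
--     return ("unknown", "ready", "warning", "blocked")[rank]
-- ===== Notes on version B (the rewrite author's own statement) =====
-- stated objective: alternative
-- what changed: Replaced filter-then-set-membership precedence classification with an arithmetic reduction: each check is mapped to a numeric severity (0 non-match, 1 ok, 2 warn, 3 fail), the maximum is taken, and the answer is read from a status table.
import Mathlib
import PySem

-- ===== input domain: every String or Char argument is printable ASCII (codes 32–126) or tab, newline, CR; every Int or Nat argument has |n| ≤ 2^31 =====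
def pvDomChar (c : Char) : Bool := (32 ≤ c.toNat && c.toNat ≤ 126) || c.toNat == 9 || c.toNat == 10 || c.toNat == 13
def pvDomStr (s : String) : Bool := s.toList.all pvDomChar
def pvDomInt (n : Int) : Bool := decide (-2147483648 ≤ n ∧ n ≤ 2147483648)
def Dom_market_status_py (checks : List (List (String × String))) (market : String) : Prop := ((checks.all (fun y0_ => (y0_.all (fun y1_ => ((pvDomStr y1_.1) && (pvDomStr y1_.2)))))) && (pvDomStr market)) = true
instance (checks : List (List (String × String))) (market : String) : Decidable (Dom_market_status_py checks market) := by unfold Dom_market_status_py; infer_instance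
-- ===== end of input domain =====

-- ===== PORT A =====
-- B replaces A's filter/set precedence classification by a map-to-severity + max reduction + table lookup; objective: alternative (same cost).
def market_status_py (checks : List (List (String × String))) (market : String) : String :=
  let market_checks := checks.filter (fun c => PySem.Dict.get? (PySem.Dict.mk c) "market" == some market)
  if market_checks.isEmpty then "unknown"
  else
    let statuses : PySem.Set String :=
      PySem.Set.ofList (market_checks.map (fun c => PySem.Str.lower (PySem.Dict.getD (PySem.Dict.mk c) "status" "")))
    if PySem.Set.contains statuses "fail" then "blocked"
    else if PySem.Set.contains statuses "warn" then "warning"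
    else "ready"

-- ===== PORT B =====
def pvSeverity (c : List (String × String)) (market : String) : Nat :=
  if PySem.Dict.get? (PySem.Dict.mk c) "market" != some market then 0
  else
    let s := PySem.Str.lower (PySem.Dict.getD (PySem.Dict.mk c) "status" "")
    if s == "fail" then 3 else if s == "warn" then 2 else 1

def market_status_py_alt (checks : List (List (String × String))) (market : String) : String :=
  let rank := (checks.map (fun c => pvSeverity c market)).foldl max 0
  ["unknown", "ready", "warning", "blocked"].getD rank "unknown"

-- ===== PRECONDITION & SPEC =====
def Spec_market_status_py (checks : List (List (String × String))) (market : String) (out : String) : Prop := out = market_status_py_alt checks market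
instance (checks : List (List (String × String))) (market : String) (out : String) : Decidable (Spec_market_status_py checks market out) := by unfold Spec_market_status_py; infer_instance

-- ===== CLAIM (what is proved, stated in full; the proofs are below) =====
def Claim_equal_market_status_py : Prop := ∀ (checks : List (List (String × String))) (market : String), Dom_market_status_py checks market → Spec_market_status_py checks market (market_status_py checks market)

-- ===== LEMMAS AND PROOFS =====

-- ===== VERDICT (by name: the statement is the Claim_ definition above) =====
-- lowered statuses of the matching checks
def pvStatusList (market : String) (checks : List (List (String × String))) : List String :=
  (checks.filter (fun c => PySem.Dict.get? (PySem.Dict.mk c) "market" == some market)).map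
    (fun c => PySem.Str.lower (PySem.Dict.getD (PySem.Dict.mk c) "status" ""))

def pvSevOf (s : String) : Nat := if s == "fail" then 3 else if s == "warn" then 2 else 1

def pvClass (L : List String) : Nat :=
  if L.contains "fail" then 3 else if L.contains "warn" then 2 else if L.isEmpty then 0 else 1

theorem pvFold_map_eq (market : String) : ∀ (checks : List (List (String × String))) (a : Nat),
    (checks.map (fun c => pvSeverity c market)).foldl max a =
      ((pvStatusList market checks).map pvSevOf).foldl max a
  | [], a => rfl
  | c :: rest, a => by
    have ih := pvFold_map_eq market rest
    by_cases hm : PySem.Dict.get? (PySem.Dict.mk c) "market" == some market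
    · have hl : pvStatusList market (c :: rest) =
          PySem.Str.lower (PySem.Dict.getD (PySem.Dict.mk c) "status" "") :: pvStatusList market rest := by
        simp [pvStatusList, hm]
      have hs : pvSeverity c market = pvSevOf (PySem.Str.lower (PySem.Dict.getD (PySem.Dict.mk c) "status" "")) := by
        simp only [beq_iff_eq] at hm
        simp [pvSeverity, pvSevOf, hm]
      rw [hl]
      simp only [List.map_cons, List.foldl_cons, hs]
      exact ih _
    · have hl : pvStatusList market (c :: rest) = pvStatusList market rest := by
        simp [pvStatusList, hm]
      have hz : pvSeverity c market = 0 := by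
        simp only [beq_iff_eq] at hm
        simp [pvSeverity, hm]
      rw [hl]
      simp only [List.map_cons, List.foldl_cons, hz]
      simpa using ih a

theorem pvClass_le (L : List String) : pvClass L ≤ 3 := by
  unfold pvClass; split_ifs <;> omega

theorem pvFold_class : ∀ (L : List String) (a : Nat),
    (L.map pvSevOf).foldl max a = max a (pvClass L)
  | [], a => by simp [pvClass]
  | s :: L, a => by
    simp only [List.map_cons, List.foldl_cons]
    rw [pvFold_class L]
    have : max (pvSevOf s) (pvClass L) = pvClass (s :: L) := by
      by_cases hf : s = "fail"
      · simp [pvSevOf, pvClass, hf]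
        have := pvClass_le L
        unfold pvClass at *; split_ifs at * <;> omega
      · by_cases hw : s = "warn"
        · simp only [pvSevOf, pvClass, hw, List.contains_cons]
          split_ifs with h1 h2 h3 h4 <;> simp_all
        · simp only [pvSevOf, pvClass, List.contains_cons, beq_iff_eq, hf, hw,
            if_false, List.isEmpty_cons]
          split_ifs with h1 h2 h3 h4 <;> simp_all
    rw [max_assoc, this]

-- ===== VERDICT (by name: the statement is the Claim_ definition above) =====
theorem market_status_py_spec : Claim_equal_market_status_py := by
  intro checks market _
  unfold Spec_market_status_py market_status_py market_status_py_alt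
  rw [pvFold_map_eq market checks 0, pvFold_class]
  by_cases h : checks.filter (fun c => PySem.Dict.get? (PySem.Dict.mk c) "market" == some market) = []
  · simp [h, pvStatusList, pvClass]
  · have hL : ¬ pvStatusList market checks = [] := by
      simp [pvStatusList, h]
    simp only [List.isEmpty_iff, h, if_false]
    have hc1 : PySem.Set.contains (PySem.Set.ofList (pvStatusList market checks)) "fail" =
        (pvStatusList market checks).contains "fail" := by
      by_cases hx : ("fail" : String) ∈ pvStatusList market checks <;> simp [hx, PySem.Set.mem_ofList]
    have hc2 : PySem.Set.contains (PySem.Set.ofList (pvStatusList market checks)) "warn" =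
        (pvStatusList market checks).contains "warn" := by
      by_cases hx : ("warn" : String) ∈ pvStatusList market checks <;> simp [hx, PySem.Set.mem_ofList]
    show (if PySem.Set.contains (PySem.Set.ofList (pvStatusList market checks)) "fail" then "blocked"
          else if PySem.Set.contains (PySem.Set.ofList (pvStatusList market checks)) "warn" then "warning"
          else "ready") = _
    rw [hc1, hc2]
    unfold pvClass
    simp only [List.isEmpty_iff, hL, if_false]
    split_ifs <;> simp
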